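-- pv_equiv track=rewrite | github.com/Happinesseuh/103cipher | 103cipher/encryption.py | convert_ascii_message
-- ===== SOURCE A (Python) =====
-- import math
--
-- def convert_ascii_message(n, str):
--     count = 0
--     row = math.ceil(len(str) / n)
--     col = n
--     mat = [[0] * int(col) for y in range(row)]
--     for i in range(row):
--         for j in range(col):
--             if (count < len(str)):
--                 mat[i][j] = ord(str[count])
--             count += 1
--     return mat
-- ===== SOURCE B (Python) =====
-- import math
--
-- def convert_ascii_message(n, str):
--     codes = [ord(c) for c in str]
--     row = math.ceil(len(str) / n)
--     codes += [0] * (row * n - len(codes))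
--     return [codes[i * n:(i + 1) * n] for i in range(row)]
-- ===== Notes on version B (the rewrite author's own statement) =====
-- stated objective: simpler
-- what changed: B builds the flat list of ASCII codes once, pads it with zeros to row*n, and reshapes it by slicing into chunks of n, replacing A's preallocated zero matrix filled by nested index loops with a running count and an in-bounds guard.
import Mathlib
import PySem

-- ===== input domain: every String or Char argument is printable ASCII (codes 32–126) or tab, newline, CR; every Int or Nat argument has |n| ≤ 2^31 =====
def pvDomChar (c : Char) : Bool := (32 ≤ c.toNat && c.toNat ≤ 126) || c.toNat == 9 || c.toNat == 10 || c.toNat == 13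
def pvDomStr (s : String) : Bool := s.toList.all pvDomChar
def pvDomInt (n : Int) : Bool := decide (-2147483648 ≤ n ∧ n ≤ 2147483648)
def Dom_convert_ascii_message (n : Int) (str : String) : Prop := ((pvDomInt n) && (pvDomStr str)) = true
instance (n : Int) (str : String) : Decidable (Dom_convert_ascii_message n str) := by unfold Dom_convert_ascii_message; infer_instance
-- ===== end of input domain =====

-- B replaces A's preallocated matrix + nested index loops + running count guard with a
-- flatten / pad / chunk-by-slicing pipeline (objective: simpler).

-- ===== PORT A =====
-- math.ceil(len(str)/n) on Dom-sized ints equals the exact rational ceiling -((-len) // n)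
-- (float rounding error is far smaller than 1/|n| here), ported as such.
def convert_ascii_message (n : Int) (str : String) : List (List Int) :=
  let s := str.toList
  let len : Int := (s.length : Int)
  let row : Int := -(PySem.Int.floordiv (-len) n)
  let col : Int := n
  let mat : List (List Int) := List.replicate row.toNat (List.replicate col.toNat 0)
  let result := (List.range row.toNat).foldl (fun acc i =>
      (List.range col.toNat).foldl (fun (acc2 : List (List Int) × Int) (j : Nat) =>
        (if acc2.2 < len
          then acc2.1.set i ((acc2.1.getD i []).set j ((s.getD acc2.2.toNat ' ').toNat : Int))
          else acc2.1, acc2.2 + 1)) acc) (mat, (0 : Int))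
  result.1

-- ===== PORT B =====
def convert_ascii_message_alt (n : Int) (str : String) : List (List Int) :=
  let codes : List Int := str.toList.map (fun c => (c.toNat : Int))
  let row : Int := -(PySem.Int.floordiv (-(codes.length : Int)) n)
  let padded := codes ++ List.replicate (row * n - (codes.length : Int)).toNat 0
  (List.range row.toNat).map (fun (i : Nat) => PySem.List.slice padded (some ((i : Int) * n)) (some (((i : Int) + 1) * n)))

-- ===== PRECONDITION & SPEC =====
-- Pre_ excludes exactly n = 0, where Python A raises ZeroDivisionError (so does B).
def Pre_convert_ascii_message (n : Int) (str : String) : Prop := n ≠ 0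
instance (n : Int) (str : String) : Decidable (Pre_convert_ascii_message n str) := by unfold Pre_convert_ascii_message; infer_instance
def pvWitness_convert_ascii_message : Int × String := (3, "hello")

def Spec_convert_ascii_message (n : Int) (str : String) (out : List (List Int)) : Prop := out = convert_ascii_message_alt n str
instance (n : Int) (str : String) (out : List (List Int)) : Decidable (Spec_convert_ascii_message n str out) := by unfold Spec_convert_ascii_message; infer_instance

-- ===== CLAIM (what is proved, stated in full; the proofs are below) =====
def Claim_equal_convert_ascii_message : Prop := ∀ (n : Int) (str : String), Dom_convert_ascii_message n str → Pre_convert_ascii_message n str → Spec_convert_ascii_message n str (convert_ascii_message n str)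

-- ===== LEMMAS AND PROOFS =====

-- the common characterisation: row i, column j holds the code at flat position i*colN+j, or 0 past the end
def pvTargetRow (codes : List Int) (colN : Nat) (i : Nat) : List Int :=
  (List.range colN).map (fun j => if i * colN + j < codes.length then codes.getD (i * colN + j) 0 else 0)

theorem pv_ceil_nonneg (len n : Int) (hl : 0 ≤ len) (hn : 0 < n) :
    0 ≤ -(PySem.Int.floordiv (-len) n) := by
  have h := (PySem.Int.neg_floordiv_neg_eq_iff_of_pos (a := len) (b := n) hn
    (q := -(PySem.Int.floordiv (-len) n))).mp rfl
  nlinarith [h.1, h.2]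

theorem pv_len_le_row_mul (len n : Int) (hn : 0 < n) :
    len ≤ -(PySem.Int.floordiv (-len) n) * n :=
  ((PySem.Int.neg_floordiv_neg_eq_iff_of_pos (a := len) (b := n) hn
    (q := -(PySem.Int.floordiv (-len) n))).mp rfl).2

theorem pv_row_nonpos (len n : Int) (hl : 0 ≤ len) (hn : n < 0) :
    -(PySem.Int.floordiv (-len) n) ≤ 0 := by
  have hmod := PySem.Int.floordiv_mul_add_mod (-len) n
  obtain ⟨hr1, hr2⟩ := PySem.Int.mod_neg_bounds (a := -len) hn
  nlinarith [hmod, hr1, hr2]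

-- inner loop with the running count split off: the count just advances by one per step
theorem pv_inner_split (f : List (List Int) → Int → Nat → List (List Int)) :
    ∀ (m : Nat) (mat : List (List Int)) (c0 : Int),
    (List.range m).foldl (fun (acc2 : List (List Int) × Int) (j : Nat) =>
        (f acc2.1 acc2.2 j, acc2.2 + 1)) (mat, c0)
      = ((List.range m).foldl (fun mm (j : Nat) => f mm (c0 + (j : Int)) j) mat, c0 + (m : Int)) := by
  intro m
  induction m with
  | zero => intro mat c0; simp
  | succ k ih =>
      intro mat c0
      simp only [List.range_succ, List.foldl_append, List.foldl_cons, List.foldl_nil, ih]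
      refine Prod.ext ?_ ?_ <;> simp <;> push_cast <;> ring

-- the inner column loop fills row i of the matrix with pvTargetRow, provided that row starts as zeros
theorem pv_inner_fill (codes : List Int) (n : Int) (colN : Nat) (hcol : (colN : Int) = n)
    (i : Nat) (mat : List (List Int)) (hi : i < mat.length)
    (hrow : mat.getD i [] = List.replicate colN (0 : Int)) :
    (List.range colN).foldl (fun mm (j : Nat) =>
        if ((i : Int) * n + (j : Int)) < (codes.length : Int)
        then mm.set i ((mm.getD i []).set j (codes.getD (((i : Int) * n + (j : Int))).toNat 0))
        else mm) mat
      = mat.set i (pvTargetRow codes colN i) := by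
  have key : ∀ m : Nat, m ≤ colN →
      (List.range m).foldl (fun mm (j : Nat) =>
        if ((i : Int) * n + (j : Int)) < (codes.length : Int)
        then mm.set i ((mm.getD i []).set j (codes.getD (((i : Int) * n + (j : Int))).toNat 0))
        else mm) mat
      = mat.set i ((List.range colN).map (fun j =>
          if j < m ∧ i * colN + j < codes.length then codes.getD (i * colN + j) 0 else 0)) := by
    intro m
    induction m with
    | zero =>
        intro _
        have hz : (List.range colN).map (fun j =>
            if j < 0 ∧ i * colN + j < codes.length then codes.getD (i * colN + j) 0 else 0)
            = List.replicate colN (0 : Int) := by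
          apply List.ext_getElem <;> simp
        rw [hz, ← hrow]
        apply List.ext_getElem
        · simp [hi]
        · intro k hk1 hk2
          by_cases hki : k = i
          · subst hki; simp [List.getD, List.getElem?_eq_getElem (by simpa using hk2)]
          · simp [List.getElem_set_ne (h := fun hh => hki hh.symm)]
    | succ m ih =>
        intro hm
        have hmc : m < colN := hm
        have e1 : ((i : Int) * n + (m : Int)) = ((i * colN + m : Nat) : Int) := by
          rw [← hcol]; push_cast; ring
        have him : i * colN + m = (((i : Int) * n + (m : Int))).toNat := by
          rw [e1]; omega
        rw [List.range_succ, List.foldl_append, List.foldl_cons, List.foldl_nil,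
          ih (Nat.le_of_lt hmc)]
        by_cases hlt : ((i : Int) * n + (m : Int)) < (codes.length : Int)
        · rw [if_pos hlt]
          have hltN : i * colN + m < codes.length := by
            rw [e1] at hlt; exact_mod_cast hlt
          rw [List.set_set]
          congr 1
          have hget : ((mat.set i ((List.range colN).map (fun j =>
              if j < m ∧ i * colN + j < codes.length then codes.getD (i * colN + j) 0 else 0))).getD i [])
              = (List.range colN).map (fun j =>
              if j < m ∧ i * colN + j < codes.length then codes.getD (i * colN + j) 0 else 0) := by
            simp [List.getD, List.getElem?_set_self (by simpa using hi)]
          rw [hget]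
          apply List.ext_getElem
          · simp [hmc]
          · intro k hk1 hk2
            by_cases hkm : k = m
            · subst hkm
              rw [List.getElem_set_self (h := by simpa [hmc] using hk1)]
              simp only [List.getElem_map, List.getElem_range]
              simp [hltN, ← him]
            · rw [List.getElem_set_ne (h := fun hh => hkm hh.symm)]
              simp only [List.getElem_map, List.getElem_range]
              have hiff : (k < m ∧ i * colN + k < codes.length) ↔
                  (k < m + 1 ∧ i * colN + k < codes.length) := by
                constructor <;> rintro ⟨h1, h2⟩ <;> exact ⟨by omega, h2⟩
              simp only [hiff]
        · rw [if_neg hlt]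
          have hltN : ¬ (i * colN + m < codes.length) := by
            rw [e1] at hlt; exact_mod_cast hlt
          congr 1
          apply List.ext_getElem
          · simp
          · intro k hk1 hk2
            simp only [List.getElem_map, List.getElem_range]
            have hiff : (k < m ∧ i * colN + k < codes.length) ↔
                (k < m + 1 ∧ i * colN + k < codes.length) := by
              constructor <;> rintro ⟨h1, h2⟩
              · exact ⟨by omega, h2⟩
              · refine ⟨?_, h2⟩
                rcases Nat.lt_succ_iff_lt_or_eq.mp h1 with h | h
                · exact h
                · exact absurd h2 (by rw [h]; exact hltN)
            simp only [hiff]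
  rw [key colN (le_refl _)]
  congr 1
  apply List.ext_getElem
  · simp [pvTargetRow]
  · intro k hk1 hk2
    simp only [List.length_map, List.length_range] at hk1
    simp only [pvTargetRow, List.getElem_map, List.getElem_range]
    have hiff : (k < colN ∧ i * colN + k < codes.length) ↔ (i * colN + k < codes.length) := by
      constructor
      · exact fun h => h.2
      · exact fun h => ⟨hk1, h⟩
    simp only [hiff]

-- the outer row loop: after m rows, the first m rows are filled and the count is m*n
theorem pv_outer_fill (s : List Char) (n : Int) (colN : Nat) (hcol : (colN : Int) = n)
    (rowN : Nat) :
    ∀ m : Nat, m ≤ rowN →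
    (List.range m).foldl (fun acc i =>
        (List.range colN).foldl (fun (acc2 : List (List Int) × Int) (j : Nat) =>
          (if acc2.2 < (s.length : Int)
            then acc2.1.set i ((acc2.1.getD i []).set j ((s.getD acc2.2.toNat ' ').toNat : Int))
            else acc2.1, acc2.2 + 1)) acc)
      (List.replicate rowN (List.replicate colN 0), (0 : Int))
    = ((List.range rowN).map (fun k =>
        if k < m then pvTargetRow (s.map fun c => (c.toNat : Int)) colN k
        else List.replicate colN 0), (m : Int) * n) := by
  intro m
  induction m with
  | zero =>
      intro _
      refine Prod.ext ?_ ?_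
      · apply List.ext_getElem <;> simp
      · simp
  | succ m ih =>
      intro hm
      have hmr : m < rowN := hm
      rw [List.range_succ, List.foldl_append, List.foldl_cons, List.foldl_nil, ih (Nat.le_of_lt hmr)]
      set codes : List Int := s.map fun c => (c.toNat : Int) with hcodes
      set matm : List (List Int) := (List.range rowN).map (fun k =>
        if k < m then pvTargetRow codes colN k else List.replicate colN 0) with hmatm
      rw [pv_inner_split (fun mm c j =>
        if c < (s.length : Int)
        then mm.set m ((mm.getD m []).set j ((s.getD c.toNat ' ').toNat : Int))
        else mm) colN matm ((m : Int) * n)]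
      have hc0 : (0 : Int) ≤ (m : Int) * n := by
        have : (0 : Int) ≤ (colN : Int) := by positivity
        nlinarith [this, hcol]
      have hfun : (fun (mm : List (List Int)) (j : Nat) =>
          if ((m : Int) * n + (j : Int)) < (s.length : Int)
          then mm.set m ((mm.getD m []).set j ((s.getD ((m : Int) * n + (j : Int)).toNat ' ').toNat : Int))
          else mm)
          = (fun (mm : List (List Int)) (j : Nat) =>
          if ((m : Int) * n + (j : Int)) < (codes.length : Int)
          then mm.set m ((mm.getD m []).set j (codes.getD (((m : Int) * n + (j : Int))).toNat 0))
          else mm) := by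
        funext mm j
        simp only [hcodes, List.length_map]
        by_cases h : ((m : Int) * n + (j : Int)) < (s.length : Int)
        · rw [if_pos h, if_pos h]
          have hin : ((m : Int) * n + (j : Int)).toNat < s.length := by omega
          have : (s.map fun c => ((c.toNat : Int))).getD ((m : Int) * n + (j : Int)).toNat 0
              = ((s.getD ((m : Int) * n + (j : Int)).toNat ' ').toNat : Int) := by
            simp [List.getD, List.getElem?_map, List.getElem?_eq_getElem hin]
          rw [this]
        · rw [if_neg h, if_neg h]
      rw [hfun]
      refine Prod.ext ?_ ?_
      · show (List.range colN).foldl _ matm = _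
        rw [pv_inner_fill codes n colN hcol m matm (by simpa [hmatm] using hmr)
          (by simp [hmatm, List.getD, List.getElem?_range hmr])]
        apply List.ext_getElem
        · simp [hmatm]
        · intro k hk1 hk2
          simp only [List.length_set, hmatm, List.length_map, List.length_range] at hk1
          by_cases hkm : k = m
          · subst hkm
            rw [List.getElem_set_self (h := by simpa [hmatm] using hk1)]
            simp only [hmatm, List.getElem_map, List.getElem_range]
            rw [if_pos (Nat.lt_succ_self k)]
          · rw [List.getElem_set_ne (h := fun hh => hkm hh.symm)]
            simp only [hmatm, List.getElem_map, List.getElem_range]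
            have hiff : (k < m) ↔ (k < m + 1) := by omega
            simp only [hiff]
      · show (m : Int) * n + (colN : Int) = ((m + 1 : Nat) : Int) * n
        rw [hcol]; push_cast; ring

-- each slice of the padded code list is pvTargetRow
theorem pv_alt_row (codes : List Int) (n : Int) (colN : Nat) (hcol : (colN : Int) = n)
    (rowN : Nat) (hlen : codes.length ≤ rowN * colN) (i : Nat) (hi : i < rowN) :
    PySem.List.slice (codes ++ List.replicate (rowN * colN - codes.length) (0 : Int))
        (some ((i : Int) * n)) (some (((i : Int) + 1) * n))
      = pvTargetRow codes colN i := by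
  have e1 : ((i : Int) * n) = ((i * colN : Nat) : Int) := by rw [← hcol]; push_cast; ring
  have e2 : (((i : Int) + 1) * n) = ((i * colN : Nat) : Int) + ((colN : Nat) : Int) := by
    rw [← hcol]; push_cast; ring
  rw [e1, e2, PySem.List.slice_natCast_add]
  have hL : (codes ++ List.replicate (rowN * colN - codes.length) (0 : Int)).length = rowN * colN := by
    simp; omega
  apply List.ext_getElem
  · simp only [List.length_take, List.length_drop, hL, pvTargetRow, List.length_map,
      List.length_range]
    have : i * colN + colN ≤ rowN * colN := by
      calc i * colN + colN = (i + 1) * colN := by ring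
        _ ≤ rowN * colN := Nat.mul_le_mul_right _ (by omega)
    omega
  · intro k hk1 hk2
    simp only [List.length_take, List.length_drop, hL] at hk1
    have hkcol : k < colN := lt_of_lt_of_le hk1 (min_le_left _ _)
    rw [List.getElem_take, List.getElem_drop]
    simp only [pvTargetRow, List.getElem_map, List.getElem_range]
    by_cases h : i * colN + k < codes.length
    · rw [List.getElem_append_left (by omega)]
      simp only [List.getD, List.getElem?_eq_getElem h, Option.getD_some, if_pos h]
    · rw [List.getElem_append_right (by omega)]
      simp [h]

-- ===== VERDICT (by name: the statement is the Claim_ definition above) =====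
theorem convert_ascii_message_spec : Claim_equal_convert_ascii_message := by
  intro n str _ hpre
  unfold Spec_convert_ascii_message convert_ascii_message convert_ascii_message_alt
  simp only [List.length_map]
  set s := str.toList with hs
  set len : Int := (s.length : Int) with hlen
  set row : Int := -(PySem.Int.floordiv (-len) n) with hrow
  have hl0 : (0 : Int) ≤ len := by positivity
  rcases lt_trichotomy n 0 with hn | hn | hn
  · -- n < 0: row ≤ 0, both sides are []
    have h0 : row.toNat = 0 := by
      have := pv_row_nonpos len n hl0 hn
      omega
    simp [h0]
  · exact absurd hn hpre
  · -- n > 0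
    set colN : Nat := n.toNat with hcolN
    have hcol : (colN : Int) = n := Int.toNat_of_nonneg (le_of_lt hn)
    set rowN : Nat := row.toNat with hrowN
    have hrow0 : (0 : Int) ≤ row := pv_ceil_nonneg len n hl0 hn
    have hrowc : ((rowN : Nat) : Int) = row := Int.toNat_of_nonneg hrow0
    have hle : len ≤ row * n := pv_len_le_row_mul len n hn
    have hleN : s.length ≤ rowN * colN := by
      have : ((rowN * colN : Nat) : Int) = row * n := by push_cast; rw [hcol, hrowc]
      omega
    have hpad : (row * n - len).toNat = rowN * colN - s.length := by
      have : ((rowN * colN : Nat) : Int) = row * n := by push_cast; rw [hcol, hrowc]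
      omega
    rw [hpad]
    have hA := pv_outer_fill s n colN hcol rowN rowN (le_refl _)
    rw [hA]
    simp only
    apply List.ext_getElem
    · simp
    · intro k hk1 hk2
      simp only [List.length_map, List.length_range] at hk1
      simp only [List.getElem_map, List.getElem_range]
      rw [if_pos hk1]
      have halt := pv_alt_row (s.map fun c => ((c.toNat : Int))) n colN hcol rowN
        (by simpa using hleN) k hk1
      simp only [List.length_map] at halt
      exact halt.symm
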